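-- pv_equiv track=rewrite | github.com/JayantGupta77/python | largest_and_second_largest.py | find_largest_and_second_largest_single_pass
-- ===== SOURCE A (Python) =====
-- import math
--
-- def find_largest_and_second_largest_single_pass(data_list):
--
--     largest = -math.inf
--     second_largest = -math.inf
--
--     for number in data_list:
--         if number > largest:
--             second_largest = largest
--             largest = number
--         elif number > second_largest and number != largest:
--             second_largest = number
--
--     if largest == -math.inf:
--         return None, None
--     if second_largest == -math.inf:
--         return largest, None
--
--     return largest, second_largest
-- ===== SOURCE B (Python) =====
-- def find_largest_and_second_largest_single_pass(data_list):
--     data_list = list(data_list)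
--     if not data_list:
--         return None, None
--     largest = max(data_list)
--     rest = [v for v in data_list if v != largest]
--     return (largest, max(rest)) if rest else (largest, None)
-- ===== Notes on version B (the rewrite author's own statement) =====
-- stated objective: simpler
-- what changed: Replaces the single-pass (largest, second) running-state tracker with sentinel -inf values by a direct filter-then-max decomposition: take max, filter out its occurrences, take max of the rest.
import Mathlib
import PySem

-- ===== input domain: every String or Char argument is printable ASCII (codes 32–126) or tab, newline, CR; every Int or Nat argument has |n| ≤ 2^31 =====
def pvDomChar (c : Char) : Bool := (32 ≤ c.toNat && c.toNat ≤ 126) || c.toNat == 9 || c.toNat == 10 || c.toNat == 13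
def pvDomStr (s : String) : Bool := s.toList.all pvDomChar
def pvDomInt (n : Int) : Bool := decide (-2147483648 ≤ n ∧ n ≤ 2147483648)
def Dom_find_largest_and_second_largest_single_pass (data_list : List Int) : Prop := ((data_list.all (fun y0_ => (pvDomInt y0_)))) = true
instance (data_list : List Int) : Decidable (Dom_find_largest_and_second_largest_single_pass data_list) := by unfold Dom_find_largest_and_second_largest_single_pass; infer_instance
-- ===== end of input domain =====

-- B replaces A's single-pass running-(largest, second) tracker with a filter-then-max
-- decomposition; objective: simpler (same O(n) cost, return value only).

-- ===== PORT A =====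
-- A's loop state: (largest, second_largest); 'none' plays the role of -math.inf
-- (the inputs are ints, so 'number > -inf' is always true and 'number != -inf' is always true).
def pvStepA (st : Option Int × Option Int) (number : Int) : Option Int × Option Int :=
  if (match st.1 with | none => true | some l => number > l) then
    (some number, st.1)
  else if (match st.2 with | none => true | some s => number > s)
          && (match st.1 with | none => true | some l => number ≠ l) then
    (st.1, some number)
  else
    st

def find_largest_and_second_largest_single_pass (data_list : List Int) : Option Int × Option Int :=
  let st := data_list.foldl pvStepA (none, none)
  match st.1 with
  | none => (none, none)
  | some _ =>
    match st.2 with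
    | none => (st.1, none)
    | some _ => (st.1, st.2)

-- ===== PORT B =====
def find_largest_and_second_largest_single_pass_alt (data_list : List Int) : Option Int × Option Int :=
  match PySem.List.max? data_list (fun x => x) with
  | none => (none, none)   -- empty list
  | some largest =>
    let rest := data_list.filter (fun v => v != largest)
    match PySem.List.max? rest (fun x => x) with
    | none => (some largest, none)
    | some s => (some largest, some s)

-- ===== PRECONDITION & SPEC =====
def Spec_find_largest_and_second_largest_single_pass (data_list : List Int) (out : Option Int × Option Int) : Prop := out = find_largest_and_second_largest_single_pass_alt data_list
instance (data_list : List Int) (out : Option Int × Option Int) : Decidable (Spec_find_largest_and_second_largest_single_pass data_list out) := by unfold Spec_find_largest_and_second_largest_single_pass; infer_instance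

-- ===== CLAIM (what is proved, stated in full; the proofs are below) =====
def Claim_equal_find_largest_and_second_largest_single_pass : Prop := ∀ (data_list : List Int), Dom_find_largest_and_second_largest_single_pass data_list → Spec_find_largest_and_second_largest_single_pass data_list (find_largest_and_second_largest_single_pass data_list)

-- ===== LEMMAS AND PROOFS =====

-- The value A's loop state takes after processing p, expressed by B's decomposition.
def pvPair (p : List Int) : Option Int × Option Int :=
  match PySem.List.max? p (fun x => x) with
  | none => (none, none)
  | some m => (some m, PySem.List.max? (p.filter (fun v => v != m)) (fun x => x))

lemma maxv_append_singleton (p : List Int) (x : Int) :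
    PySem.List.max? (p ++ [x]) (fun y => y)
      = some (match PySem.List.max? p (fun y => y) with | none => x | some m => max m x) := by
  cases p with
  | nil => simp [PySem.List.max?_id_cons, show PySem.List.max? ([] : List Int) (fun y => y) = none from rfl]
  | cons y t =>
    simp [PySem.List.max?_id_cons, List.foldl_append]

lemma loopA (p : List Int) : p.foldl pvStepA (none, none) = pvPair p := by
  induction p using List.reverseRecOn with
  | nil => simp [pvPair, PySem.List.max?]
  | append_singleton p x ih =>
    rw [List.foldl_append, List.foldl_cons, List.foldl_nil, ih]
    rcases hm : PySem.List.max? p (fun y => y) with _ | m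
    · -- p = []
      have hp : p = [] := (PySem.List.max?_eq_none_iff _ _).1 hm
      subst hp
      simp [pvPair, pvStepA, PySem.List.max?]
    · have hmax : ∀ y ∈ p, y ≤ m := by
        intro y hy; exact PySem.List.max?_isMax hm y hy
      have hPp : pvPair p = (some m, PySem.List.max? (p.filter (fun v => v != m)) (fun x => x)) := by
        simp [pvPair, hm]
      rw [hPp]
      by_cases hxm : m < x
      · -- x becomes the new largest, old largest the new second
        have hfilt : p.filter (fun v => v != x) = p := by
          apply List.filter_eq_self.2
          intro y hy
          simp only [bne_iff_ne, ne_eq]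
          intro h; subst h; exact absurd (hmax _ hy) (not_le.2 hxm)
        have hM : max m x = x := max_eq_right (le_of_lt hxm)
        simp only [pvStepA, pvPair, maxv_append_singleton, hm]
        rw [hM]
        simp [hxm, List.filter_append, hfilt, hm]
      · -- x ≤ m : largest stays m
        have hxm' : ¬ (x > m) := hxm
        have hM : max m x = m := max_eq_left (not_lt.1 hxm)
        by_cases hxe : x = m
        · -- duplicate of the largest: nothing changes
          subst hxe
          simp only [pvStepA, pvPair, maxv_append_singleton, hm]
          rw [hM]
          simp [List.filter_append]
        · -- x < m : x joins the 'rest' list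
          have hfx : List.filter (fun v => v != m) [x] = [x] := by
            simp [hxe]
          rcases hs : PySem.List.max? (p.filter (fun v => v != m)) (fun x => x) with _ | s
          · -- rest was empty: x becomes the second largest
            have hq : p.filter (fun v => v != m) = [] := (PySem.List.max?_eq_none_iff _ _).1 hs
            simp only [pvStepA, pvPair, maxv_append_singleton, hm]
            rw [hM]
            simp [hxm', hxe, List.filter_append, hq, hfx, PySem.List.max?_id_cons]
          · -- rest had max s: new second is max s x
            have hq : PySem.List.max? (p.filter (fun v => v != m) ++ [x]) (fun y => y)
                = some (max s x) := by
              rw [maxv_append_singleton, hs]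
            simp only [pvStepA, pvPair, maxv_append_singleton, hm]
            rw [hM]
            by_cases hxs : x > s
            · have : max s x = x := max_eq_right (le_of_lt hxs)
              simp [hxm', hxe, hxs, List.filter_append, hfx, hq, this]
            · have : max s x = s := max_eq_left (not_lt.1 hxs)
              simp [hxm', hxe, hxs, List.filter_append, hfx, hq, this]

-- ===== VERDICT (by name: the statement is the Claim_ definition above) =====
theorem find_largest_and_second_largest_single_pass_spec : Claim_equal_find_largest_and_second_largest_single_pass := by
  intro data_list _
  unfold Spec_find_largest_and_second_largest_single_pass
  unfold find_largest_and_second_largest_single_pass find_largest_and_second_largest_single_pass_alt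
  rw [loopA]
  unfold pvPair
  rcases hm : PySem.List.max? data_list (fun x => x) with _ | m
  · simp
  · rcases hs : PySem.List.max? (data_list.filter (fun v => v != m)) (fun x => x) with _ | s <;> simp [hs]
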